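-- pv_equiv track=rewrite | github.com/SLamasse/Operations | outils/generalites.py | SupprimerValeursIdentiques
-- ===== SOURCE A (Python) =====
-- def SupprimerValeursIdentiques(lst,lst1):
--     l = lst.copy()
--     l1 = lst1.copy()
--     i = 0
--     while i < len(l1):
--         if l1[i] in l:
--             l.remove(l1[i]) # n'efface que la première occurrence
--             #dans une liste
--         elif not l:
--             l.append(1)
--         i += 1
--     return l
-- ===== SOURCE B (Python) =====
-- def SupprimerValeursIdentiques(lst, lst1):
--     remaining = {}
--     for v in lst1:
--         remaining[v] = remaining.get(v, 0) + 1
--     out = []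
--     for v in lst:
--         if remaining.get(v, 0) > 0:
--             remaining[v] -= 1
--         else:
--             out.append(v)
--     return out
-- ===== Notes on version B (the rewrite author's own statement) =====
-- stated objective: faster
-- what changed: Replaces A's per-element membership scan and list.remove (each O(n)) by a counting dict built in one pass over lst1 followed by a single pass over lst that skips the first k occurrences of each value.
-- intended difference: On inputs where lst1's removals empty the list and the rest of lst1 leaves A's appended placeholder in place, A returns [1] because of its accidental 'append 1 when the list is empty' branch, while B returns [] — a removal function should not invent elements. — e.g. on SupprimerValeursIdentiques([], [2]): A returns [1], B returns []
import Mathlib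
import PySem

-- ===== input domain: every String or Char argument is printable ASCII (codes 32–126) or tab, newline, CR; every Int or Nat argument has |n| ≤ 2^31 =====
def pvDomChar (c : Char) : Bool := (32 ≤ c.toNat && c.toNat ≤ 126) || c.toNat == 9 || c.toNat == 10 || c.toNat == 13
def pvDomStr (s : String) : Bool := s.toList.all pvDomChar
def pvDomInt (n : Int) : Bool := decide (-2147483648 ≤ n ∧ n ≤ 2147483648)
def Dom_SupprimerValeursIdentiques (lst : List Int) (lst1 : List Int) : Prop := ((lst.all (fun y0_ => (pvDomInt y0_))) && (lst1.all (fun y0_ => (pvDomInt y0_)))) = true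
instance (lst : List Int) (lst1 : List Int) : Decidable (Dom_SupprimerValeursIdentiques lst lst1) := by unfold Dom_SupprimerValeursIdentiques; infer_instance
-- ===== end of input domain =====

-- B replaces A's quadratic scan-and-remove loop by a counting dict over lst1 plus one
-- skip pass over lst (objective: faster, O(n+m) instead of O(n·m)); where A's
-- 'append 1 when empty' branch leaves a spurious 1 in the result, B returns the
-- residual without it (see D_ below).

-- ===== PORT A =====
-- the while loop over l1 (index i advances by one each iteration), state l
def pvLoopA : List Int → List Int → List Int
  | l, [] => l
  | l, v :: rest =>
    if l.contains v then pvLoopA ((PySem.List.remove? l v).getD l) rest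
    else if l = [] then pvLoopA (l ++ [1]) rest
    else pvLoopA l rest

def SupprimerValeursIdentiques (lst : List Int) (lst1 : List Int) : List Int :=
  pvLoopA lst lst1

-- ===== PORT B =====
-- remaining[v] = remaining.get(v, 0) + 1 for v in lst1
def pvBuildCnt (lst1 : List Int) : PySem.Dict Int Int :=
  lst1.foldl (fun d v => d.insert v (d.getD v 0 + 1)) PySem.Dict.empty

-- the output pass over lst, state (remaining, out)
def pvSkipLoop : PySem.Dict Int Int → List Int → List Int → List Int
  | _rem, out, [] => out
  | rem, out, v :: rest =>
    if rem.getD v 0 > 0 then pvSkipLoop (rem.insert v (rem.getD v 0 - 1)) out rest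
    else pvSkipLoop rem (out ++ [v]) rest

def SupprimerValeursIdentiques_alt (lst : List Int) (lst1 : List Int) : List Int :=
  pvSkipLoop (pvBuildCnt lst1) [] lst

-- ===== PRECONDITION & SPEC =====
-- does the multiset of p cover the multiset of r?
def pvCovers (r p : List Int) : Bool := r.all (fun v => decide (r.count v ≤ p.count v))

-- length of the shortest prefix of s whose multiset covers r (none if even s does not)
def pvMinIdx? (r s : List Int) : Option Nat :=
  (List.range (s.length + 1)).find? (fun i => pvCovers r (s.take i))

-- once A's working list is empty it holds at most one appended 1: a later 1 in lst1
-- toggles it away, any other later element forces it present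
def pvEStep (e : Bool) (v : Int) : Bool := if v = 1 then !e else true
def pvERun (e : Bool) (s : List Int) : Bool := s.foldl pvEStep e

def pvEB (r s : List Int) : Bool :=
  match pvMinIdx? r s with
  | some i => pvERun false (s.drop i)
  | none => false

-- On inputs where lst1's removals empty the list and the rest of lst1 leaves A's appended
-- placeholder in place, A returns [1] because of its accidental 'append 1 when the list is
-- empty' branch, while B returns [] — a removal function should not invent elements.
def D_SupprimerValeursIdentiques (lst : List Int) (lst1 : List Int) : Prop :=
  pvEB lst lst1 = true
instance (lst : List Int) (lst1 : List Int) : Decidable (D_SupprimerValeursIdentiques lst lst1) := by unfold D_SupprimerValeursIdentiques; infer_instance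

def Spec_SupprimerValeursIdentiques (lst : List Int) (lst1 : List Int) (out : List Int) : Prop := ¬ D_SupprimerValeursIdentiques lst lst1 → out = SupprimerValeursIdentiques_alt lst lst1
instance (lst : List Int) (lst1 : List Int) (out : List Int) : Decidable (Spec_SupprimerValeursIdentiques lst lst1 out) := by unfold Spec_SupprimerValeursIdentiques; infer_instance

def pvDiffWitness_SupprimerValeursIdentiques : List Int × List Int := ([], [2])
def pvDiffWitnessOut_SupprimerValeursIdentiques : (List Int) × (List Int) := ([1], [])

-- ===== CLAIM (what is proved, stated in full; the proofs are below) =====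
def Claim_unchanged_SupprimerValeursIdentiques : Prop := ∀ (lst : List Int) (lst1 : List Int), Dom_SupprimerValeursIdentiques lst lst1 → Spec_SupprimerValeursIdentiques lst lst1 (SupprimerValeursIdentiques lst lst1)
def Claim_changed_SupprimerValeursIdentiques : Prop := Dom_SupprimerValeursIdentiques (pvDiffWitness_SupprimerValeursIdentiques.1) (pvDiffWitness_SupprimerValeursIdentiques.2) ∧ D_SupprimerValeursIdentiques (pvDiffWitness_SupprimerValeursIdentiques.1) (pvDiffWitness_SupprimerValeursIdentiques.2) ∧ SupprimerValeursIdentiques (pvDiffWitness_SupprimerValeursIdentiques.1) (pvDiffWitness_SupprimerValeursIdentiques.2) = pvDiffWitnessOut_SupprimerValeursIdentiques.1 ∧ SupprimerValeursIdentiques_alt (pvDiffWitness_SupprimerValeursIdentiques.1) (pvDiffWitness_SupprimerValeursIdentiques.2) = pvDiffWitnessOut_SupprimerValeursIdentiques.2 ∧ pvDiffWitnessOut_SupprimerValeursIdentiques.1 ≠ pvDiffWitnessOut_SupprimerValeursIdentiques.2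
def Claim_exact_SupprimerValeursIdentiques : Prop := ∀ (lst : List Int) (lst1 : List Int), Dom_SupprimerValeursIdentiques lst lst1 → D_SupprimerValeursIdentiques lst lst1 → SupprimerValeursIdentiques lst lst1 ≠ SupprimerValeursIdentiques_alt lst lst1

-- ===== LEMMAS AND PROOFS =====

-- abstract removal counts: pvResid lst t = lst with the first (t v) occurrences of each v skipped
def pvResid : List Int → (Int → Nat) → List Int
  | [], _ => []
  | x :: xs, t => if t x > 0 then pvResid xs (fun y => if y = x then t y - 1 else t y) else x :: pvResid xs t

def pvInc (t : Int → Nat) (v : Int) : Int → Nat := fun y => if y = v then t y + 1 else t y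

-- what A's loop does to the original elements, ignoring the placeholder 1s
def pvSpecRes : List Int → List Int → List Int
  | r, [] => r
  | r, v :: s => if v ∈ r then pvSpecRes (r.erase v) s else pvSpecRes r s

theorem pvResid_zero (lst : List Int) : pvResid lst (fun _ => 0) = lst := by
  induction lst with
  | nil => rfl
  | cons x xs ih => simp [pvResid, ih]

theorem bool_eq_of_iff {a b : Bool} (h : a = true ↔ b = true) : a = b := by
  cases a <;> cases b <;> simp_all

theorem pvEStep_false (v : Int) : pvEStep false v = true := by
  simp [pvEStep]

theorem pvCovers_nil_true (p : List Int) : pvCovers [] p = true := by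
  simp [pvCovers]

theorem pvCovers_of_nil (r : List Int) (hr : r ≠ []) : pvCovers r [] = false := by
  cases r with
  | nil => exact absurd rfl hr
  | cons x xs =>
    apply Bool.eq_false_iff.mpr
    intro h
    rw [pvCovers, List.all_eq_true] at h
    have := h x (by simp)
    simp at this

theorem pvCovers_cons_mem (r p : List Int) (v : Int) (hv : v ∈ r) :
    pvCovers r (v :: p) = pvCovers (r.erase v) p := by
  apply bool_eq_of_iff
  simp only [pvCovers, List.all_eq_true, decide_eq_true_eq]
  constructor
  · intro h w hw
    have hwr : w ∈ r := List.mem_of_mem_erase hw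
    have := h w hwr
    rw [List.count_cons] at this
    rw [List.count_erase]
    by_cases hwv : w = v
    · subst hwv; simp at this ⊢; omega
    · have h1 : (w == v) = false := by simp [hwv]
      simp at this ⊢; omega
  · intro h w hw
    rw [List.count_cons]
    by_cases hwv : w = v
    · subst hwv
      by_cases hmem : w ∈ r.erase w
      · have := h w hmem
        rw [List.count_erase] at this
        simp at this ⊢
        omega
      · have hc : (r.erase w).count w = 0 := List.count_eq_zero.mpr hmem
        rw [List.count_erase] at hc
        simp at hc ⊢
        omega
    · have hmem : w ∈ r.erase v := List.mem_erase_of_ne hwv |>.mpr hw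
      have := h w hmem
      rw [List.count_erase] at this
      simp at this ⊢
      omega

theorem pvCovers_cons_not_mem (r p : List Int) (v : Int) (hv : v ∉ r) :
    pvCovers r (v :: p) = pvCovers r p := by
  apply bool_eq_of_iff
  simp only [pvCovers, List.all_eq_true, decide_eq_true_eq]
  constructor <;> intro h w hw <;> have := h w hw <;> rw [List.count_cons] at * <;>
    have hwv : ¬ ((v == w) = true) := by simp; rintro rfl; exact hv hw
  · rw [if_neg hwv] at this; omega
  · rw [if_neg hwv]; omega

theorem pvMinIdx_nil_left (s : List Int) : pvMinIdx? [] s = some 0 := by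
  unfold pvMinIdx?
  rw [List.range_succ_eq_map]
  rw [List.find?_cons_of_pos (by simpa using pvCovers_nil_true ((s.take 0)))]

theorem pvMinIdx_shift (r : List Int) (v : Int) (s : List Int) (hr : r ≠ []) :
    pvMinIdx? r (v :: s) = (pvMinIdx? (if v ∈ r then r.erase v else r) s).map Nat.succ := by
  unfold pvMinIdx?
  have hlen : (v :: s).length + 1 = (s.length + 1) + 1 := by simp
  rw [hlen, List.range_succ_eq_map,
    List.find?_cons_of_neg (by simpa using pvCovers_of_nil r hr), List.find?_map]
  have hp : ((fun i => pvCovers r ((v :: s).take i)) ∘ Nat.succ)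
      = fun i => pvCovers (if v ∈ r then r.erase v else r) (s.take i) := by
    funext i
    show pvCovers r ((v :: s).take (i + 1)) = _
    rw [List.take_succ_cons]
    by_cases hv : v ∈ r
    · rw [if_pos hv, pvCovers_cons_mem r _ v hv]
    · rw [if_neg hv, pvCovers_cons_not_mem r _ v hv]
  rw [hp]

theorem pvEB_nil_left (s : List Int) : pvEB [] s = pvERun false s := by
  unfold pvEB
  rw [pvMinIdx_nil_left]
  rfl

theorem pvEB_shift (r : List Int) (v : Int) (s : List Int) (hr : r ≠ []) :
    pvEB r (v :: s) = pvEB (if v ∈ r then r.erase v else r) s := by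
  unfold pvEB
  rw [pvMinIdx_shift r v s hr]
  cases pvMinIdx? (if v ∈ r then r.erase v else r) s with
  | none => rfl
  | some i => simp [List.drop_succ_cons]

theorem pvEB_nil_right (r : List Int) (hr : r ≠ []) : pvEB r [] = false := by
  unfold pvEB pvMinIdx?
  rw [show (List.range ((([] : List Int)).length + 1)) = [0] from rfl]
  rw [List.find?_cons_of_neg (by simpa using pvCovers_of_nil r hr)]
  rfl

theorem pvSpecRes_nil (s : List Int) : pvSpecRes [] s = [] := by
  induction s with
  | nil => rfl
  | cons v s ih => simp [pvSpecRes, ih]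

-- the placeholder automaton: once the working list is empty it is [1]^e
theorem pvAuto (s : List Int) : ∀ e : Bool,
    pvLoopA (List.replicate e.toNat 1) s = List.replicate (pvERun e s).toNat 1 := by
  induction s with
  | nil => intro e; rfl
  | cons v s ih =>
    intro e
    cases e with
    | false =>
      show pvLoopA [] (v :: s) = _
      rw [pvLoopA, if_neg (by simp), if_pos rfl]
      have : ([] : List Int) ++ [1] = List.replicate (true : Bool).toNat 1 := rfl
      rw [this, ih true]
      simp [pvERun, pvEStep_false]
    | true =>
      show pvLoopA [1] (v :: s) = _
      by_cases hv : v = 1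
      · subst hv
        have hmem : (1 : Int) ∈ [(1 : Int)] := by simp
        rw [pvLoopA, if_pos (by simp), PySem.List.remove?_eq_some_erase _ 1 hmem]
        have : (([(1 : Int)].erase 1) : List Int) = List.replicate (false : Bool).toNat 1 := rfl
        simp only [Option.getD_some, this, ih false]
        simp [pvERun, pvEStep]
      · rw [pvLoopA, if_neg (by simp [List.contains_eq_mem]; omega), if_neg (by simp)]
        have : ([(1 : Int)]) = List.replicate (true : Bool).toNat 1 := rfl
        rw [this, ih true]
        simp [pvERun, pvEStep, hv]

-- characterisation of A's loop: residual of the originals plus the placeholder state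
theorem pvLoopA_char (s : List Int) : ∀ r : List Int,
    pvLoopA r s = pvSpecRes r s ++ List.replicate (pvEB r s).toNat 1 := by
  induction s with
  | nil =>
    intro r
    cases hr : r with
    | nil =>
      rw [show pvEB [] [] = false from by rw [pvEB_nil_left]; rfl]
      simp [pvLoopA, pvSpecRes]
    | cons x xs =>
      rw [pvEB_nil_right _ (by simp)]
      simp [pvLoopA, pvSpecRes]
  | cons v s ih =>
    intro r
    by_cases hr : r = []
    · subst hr
      rw [pvLoopA, if_neg (by simp), if_pos rfl]
      have h2 : ([] : List Int) ++ [1] = List.replicate (true : Bool).toNat 1 := rfl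
      rw [h2, pvAuto s true]
      rw [show pvSpecRes [] (v :: s) = [] from pvSpecRes_nil _]
      rw [pvEB_nil_left]
      simp [pvERun, pvEStep_false]
    · by_cases hv : v ∈ r
      · rw [pvLoopA, if_pos (by simpa using hv), PySem.List.remove?_eq_some_erase _ v hv]
        simp only [Option.getD_some]
        rw [ih (r.erase v)]
        rw [show pvSpecRes r (v :: s) = pvSpecRes (r.erase v) s from by rw [pvSpecRes, if_pos hv]]
        rw [pvEB_shift r v s hr, if_pos hv]
      · rw [pvLoopA, if_neg (by simp [List.contains_eq_mem]; exact hv), if_neg hr]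
        rw [ih r]
        rw [show pvSpecRes r (v :: s) = pvSpecRes r s from by rw [pvSpecRes, if_neg hv]]
        rw [pvEB_shift r v s hr, if_neg hv]

-- pvResid with t bumped at a present value = erase first, then pvResid
theorem pvResid_erase (r : List Int) : ∀ (t : Int → Nat) (v : Int), v ∈ r →
    pvResid r (pvInc t v) = pvResid (r.erase v) t := by
  induction r with
  | nil => intro t v h; simp at h
  | cons x xs ih =>
    intro t v hv
    by_cases hxv : x = v
    · subst hxv
      rw [List.erase_cons_head]
      have hpos : pvInc t x x > 0 := by simp [pvInc]
      rw [pvResid, if_pos hpos]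
      congr 1
      funext y
      by_cases hy : y = x
      · subst hy; simp [pvInc]
      · simp [pvInc, hy]
    · rw [List.erase_cons_tail (by simp; omega)]
      have hvxs : v ∈ xs := by
        rcases List.mem_cons.mp hv with h | h
        · exact absurd h.symm hxv
        · exact h
      have hval : pvInc t v x = t x := by simp [pvInc, hxv]
      by_cases hx : t x > 0
      · rw [pvResid, if_pos (by rw [hval]; exact hx), pvResid, if_pos hx]
        have hcomm : (fun y => if y = x then pvInc t v y - 1 else pvInc t v y)
            = pvInc (fun y => if y = x then t y - 1 else t y) v := by
          funext y
          by_cases hy : y = x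
          · subst hy; simp [pvInc, hxv]
          · by_cases hy' : y = v
            · subst hy'; simp [pvInc, hy]
            · simp [pvInc, hy, hy']
        rw [hcomm, ih _ v hvxs]
      · rw [pvResid, if_neg (by rw [hval]; exact hx), pvResid, if_neg hx]
        rw [ih t v hvxs]

-- pvResid ignores t at values absent from r
theorem pvResid_inc_not_mem (r : List Int) : ∀ (t : Int → Nat) (v : Int), v ∉ r →
    pvResid r (pvInc t v) = pvResid r t := by
  induction r with
  | nil => intro t v _; rfl
  | cons x xs ih =>
    intro t v hv
    have hxv : x ≠ v := fun h => hv (by simp [h])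
    have hvxs : v ∉ xs := fun h => hv (by simp [h])
    have hval : pvInc t v x = t x := by simp [pvInc, hxv]
    by_cases hx : t x > 0
    · rw [pvResid, if_pos (by rw [hval]; exact hx), pvResid, if_pos hx]
      have hcomm : (fun y => if y = x then pvInc t v y - 1 else pvInc t v y)
          = pvInc (fun y => if y = x then t y - 1 else t y) v := by
        funext y
        by_cases hy : y = x
        · subst hy; simp [pvInc, hxv]
        · by_cases hy' : y = v
          · subst hy'; simp [pvInc, hy]
          · simp [pvInc, hy, hy']
      rw [hcomm, ih _ v hvxs]
    · rw [pvResid, if_neg (by rw [hval]; exact hx), pvResid, if_neg hx]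
      rw [ih t v hvxs]

theorem pvSpecRes_eq_resid (s : List Int) : ∀ r : List Int,
    pvSpecRes r s = pvResid r (fun v => s.count v) := by
  induction s with
  | nil =>
    intro r
    have : (fun v => List.count v ([] : List Int)) = fun _ => 0 := by
      funext v; simp
    rw [this, pvResid_zero]
    rfl
  | cons v s ih =>
    intro r
    have hcnt : (fun w => List.count w (v :: s)) = pvInc (fun w => List.count w s) v := by
      funext w
      simp only [List.count_cons, pvInc]
      by_cases hw : w = v
      · simp [hw]
      · simp [hw]
        omega
    rw [hcnt]
    by_cases hv : v ∈ r
    · rw [pvSpecRes, if_pos hv, ih (r.erase v), pvResid_erase r _ v hv]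
    · rw [pvSpecRes, if_neg hv, ih r, pvResid_inc_not_mem r _ v hv]

-- B-side: the counting dict holds exactly the counts of lst1
theorem pvBuildCnt_getD_aux (lst : List Int) : ∀ (d : PySem.Dict Int Int) (w : Int),
    (lst.foldl (fun d v => d.insert v (d.getD v 0 + 1)) d).getD w 0 = d.getD w 0 + lst.count w := by
  induction lst with
  | nil => intro d w; simp
  | cons x xs ih =>
    intro d w
    simp only [List.foldl_cons]
    rw [ih]
    rw [PySem.Dict.getD_insert]
    by_cases hw : w = x
    · subst hw; simp; ring
    · simp [hw, Ne.symm hw]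

theorem pvBuildCnt_getD (lst1 : List Int) (w : Int) :
    (pvBuildCnt lst1).getD w 0 = (lst1.count w : Int) := by
  unfold pvBuildCnt
  rw [pvBuildCnt_getD_aux]
  simp

-- B-side: the skip pass computes pvResid
theorem pvSkipLoop_resid (lst : List Int) : ∀ (rem : PySem.Dict Int Int) (out : List Int) (t : Int → Nat),
    (∀ v, rem.getD v 0 = (t v : Int)) → pvSkipLoop rem out lst = out ++ pvResid lst t := by
  induction lst with
  | nil => intro rem out t _; simp [pvSkipLoop, pvResid]
  | cons x xs ih =>
    intro rem out t ht
    by_cases hx : t x > 0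
    · have h1 : rem.getD x 0 > 0 := by rw [ht]; exact_mod_cast hx
      simp only [pvSkipLoop, pvResid, if_pos h1, if_pos hx]
      apply ih
      intro v
      rw [PySem.Dict.getD_insert]
      by_cases hv : v = x
      · subst hv; simp [ht]; omega
      · simp [hv, ht]
    · have h1 : ¬ rem.getD x 0 > 0 := by rw [ht]; exact_mod_cast hx
      simp only [pvSkipLoop, pvResid, if_neg h1, if_neg hx]
      rw [ih _ _ t ht]
      simp

theorem pvAlt_eq (lst lst1 : List Int) :
    SupprimerValeursIdentiques_alt lst lst1 = pvSpecRes lst lst1 := by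
  unfold SupprimerValeursIdentiques_alt
  rw [pvSkipLoop_resid lst (pvBuildCnt lst1) [] (fun v => lst1.count v)
      (fun v => pvBuildCnt_getD lst1 v)]
  rw [pvSpecRes_eq_resid]
  rfl

theorem pvA_eq (lst lst1 : List Int) :
    SupprimerValeursIdentiques lst lst1
      = SupprimerValeursIdentiques_alt lst lst1 ++ List.replicate (pvEB lst lst1).toNat 1 := by
  unfold SupprimerValeursIdentiques
  rw [pvLoopA_char lst1 lst, pvAlt_eq]

-- ===== VERDICT (by name: the statements are the Claim_ definitions above) =====
theorem SupprimerValeursIdentiques_spec : Claim_unchanged_SupprimerValeursIdentiques := by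
  intro lst lst1 _dom hD
  rw [pvA_eq]
  have : pvEB lst lst1 = false := by
    cases h : pvEB lst lst1
    · rfl
    · exact absurd h hD
  rw [this]
  simp

theorem SupprimerValeursIdentiques_changed : Claim_changed_SupprimerValeursIdentiques := by
  unfold Claim_changed_SupprimerValeursIdentiques; decide

theorem SupprimerValeursIdentiques_tight : Claim_exact_SupprimerValeursIdentiques := by
  intro lst lst1 _dom hD
  rw [pvA_eq, hD]
  intro h
  have := congrArg List.length h
  simp at this
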